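-- pv_equiv track=rewrite | github.com/dnghia123/comp110-21s-workspace | exercises/ex03/palindromify.py | palindromify
-- ===== SOURCE A (Python) =====
-- def palindromify(p: str, l: bool) -> str:
--     """Converting words to palindrome."""
--     i = 0
--     cap: list[str] = []
--     while i < len(p):
--         cap.append(p[i])
--         i += 1
--     if l is True:
--         i = 0
--         length:int = len(cap)
--         iteration:int = length - 1
--         while i < length + iteration:
--             cap.append(cap[(len(cap)-1) - i])
--             i += 2
--     if l is False:
--         i = 0
--         length:int = len(cap)
--         iteration: int = length - 2
--         while i < length + iteration:
--             cap.append(cap[(len(cap)-2) - i])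
--             i += 2
--     word = ""
--     for p in cap:
--         word += p
--     return word
-- ===== SOURCE B (Python) =====
-- def palindromify(p: str, l: bool) -> str:
--     """Converting words to palindrome."""
--     if l is True:
--         return p + p[::-1]
--     if l is False:
--         return p + p[:-1][::-1]
--     return p
-- ===== Notes on version B (the rewrite author's own statement) =====
-- stated objective: simpler
-- what changed: Replaced A's three while-loops with index arithmetic (char-by-char copy, mirror-append indexing backwards into the growing list, and a concatenating join loop) by closed-form slicing: p + p[::-1] when l is True, p + p[:-1][::-1] when l is False.
import Mathlib
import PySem

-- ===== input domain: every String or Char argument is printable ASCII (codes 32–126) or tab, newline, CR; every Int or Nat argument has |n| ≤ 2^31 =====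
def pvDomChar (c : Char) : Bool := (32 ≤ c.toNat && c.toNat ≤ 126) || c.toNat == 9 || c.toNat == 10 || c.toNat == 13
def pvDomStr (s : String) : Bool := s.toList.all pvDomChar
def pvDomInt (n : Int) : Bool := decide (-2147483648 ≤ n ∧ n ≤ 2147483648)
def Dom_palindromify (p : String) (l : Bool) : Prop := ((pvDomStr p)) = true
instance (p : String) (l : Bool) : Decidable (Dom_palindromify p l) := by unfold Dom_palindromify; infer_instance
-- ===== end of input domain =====

-- B replaces A's index-arithmetic mirroring loops with closed-form slicing/reversal (objective: simpler).

-- ===== PORT A =====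
-- `while i < len(p): cap.append(p[i]); i += 1`
def pvCopyLoop (p : List Char) (i : Int) (cap : List Char) : List Char :=
  if _h : i < (p.length : Int) then
    pvCopyLoop p (i + 1) (cap ++ [PySem.List.pyGetD p i ' '])
  else cap
termination_by ((p.length : Int) - i).toNat
decreasing_by omega

-- `while i < bound: cap.append(cap[(len(cap)-1) - i]); i += 2`  (the `l is True` loop; bound fixed before the loop)
def pvMirrorLoopT (bound : Int) (i : Int) (cap : List Char) : List Char :=
  if _h : i < bound then
    pvMirrorLoopT bound (i + 2) (cap ++ [PySem.List.pyGetD cap (((cap.length : Int) - 1) - i) ' '])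
  else cap
termination_by (bound - i).toNat
decreasing_by omega

-- `while i < bound: cap.append(cap[(len(cap)-2) - i]); i += 2`  (the `l is False` loop)
def pvMirrorLoopF (bound : Int) (i : Int) (cap : List Char) : List Char :=
  if _h : i < bound then
    pvMirrorLoopF bound (i + 2) (cap ++ [PySem.List.pyGetD cap (((cap.length : Int) - 2) - i) ' '])
  else cap
termination_by (bound - i).toNat
decreasing_by omega

def palindromify (p : String) (l : Bool) : String :=
  let cap := pvCopyLoop p.toList 0 []
  let cap :=
    if l = true then
      let length : Int := cap.length
      let iteration : Int := length - 1
      pvMirrorLoopT (length + iteration) 0 cap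
    else cap
  let cap :=
    if l = false then
      let length : Int := cap.length
      let iteration : Int := length - 2
      pvMirrorLoopF (length + iteration) 0 cap
    else cap
  -- `word = ""; for c in cap: word += c; return word`
  String.ofList (cap.foldl (fun w c => w ++ [c]) [])

-- ===== PORT B =====
def palindromify_alt (p : String) (l : Bool) : String :=
  if l = true then
    String.ofList (p.toList ++ (PySem.List.slice? p.toList none none (-1)).getD [])
  else if l = false then
    String.ofList (p.toList ++
      (PySem.List.slice? (PySem.List.slice p.toList none (some (-1))) none none (-1)).getD [])
  else p

-- ===== PRECONDITION & SPEC =====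
def Spec_palindromify (p : String) (l : Bool) (out : String) : Prop := out = palindromify_alt p l
instance (p : String) (l : Bool) (out : String) : Decidable (Spec_palindromify p l out) := by unfold Spec_palindromify; infer_instance

-- ===== CLAIM (what is proved, stated in full; the proofs are below) =====
def Claim_equal_palindromify : Prop := ∀ (p : String) (l : Bool), Dom_palindromify p l → Spec_palindromify p l (palindromify p l)

-- ===== LEMMAS AND PROOFS =====

theorem pvCopyLoop_eq (p : List Char) : ∀ (k : Nat) (cap : List Char),
    pvCopyLoop p (k : Int) cap = cap ++ p.drop k := by
  intro k
  induction hd : p.length - k using Nat.strong_induction_on generalizing k with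
  | _ d ih =>
    intro cap
    rw [pvCopyLoop]
    by_cases h : (k : Int) < (p.length : Int)
    · have hk : k < p.length := by exact_mod_cast h
      simp only [h, dif_pos]
      have h1 : ((k : Int) + 1) = ((k + 1 : Nat) : Int) := by push_cast; ring
      rw [h1, ih (p.length - (k + 1)) (by omega) (k + 1) rfl]
      have hget : PySem.List.pyGetD p (k : Int) ' ' = p[k] := by
        rw [PySem.List.pyGetD_natCast]
        simp [List.getD_eq_getElem?_getD, List.getElem?_eq_getElem hk]
      rw [hget, List.append_assoc]
      congr 1
      rw [List.drop_eq_getElem_cons hk]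
      simp
    · have hk : p.length ≤ k := by omega
      simp [h, List.drop_eq_nil_of_le hk]

-- Loop invariant for the `l is True` loop: after k appends the list is orig ++ (first k chars of
-- orig.reverse); the loop finishes with orig ++ orig.reverse.
theorem pvMirrorLoopT_eq (orig : List Char) : ∀ (k : Nat), k ≤ orig.length →
    pvMirrorLoopT ((orig.length : Int) + ((orig.length : Int) - 1)) (2 * (k : Int))
      (orig ++ orig.reverse.take k) = orig ++ orig.reverse := by
  intro k
  induction hd : orig.length - k using Nat.strong_induction_on generalizing k with
  | _ d ih =>
    intro hk
    rw [pvMirrorLoopT]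
    by_cases h : 2 * (k : Int) < ((orig.length : Int) + ((orig.length : Int) - 1))
    · have hklt : k < orig.length := by omega
      simp only [h, dif_pos]
      have hlen : (orig ++ orig.reverse.take k).length = orig.length + k := by
        simp; omega
      have hidx : (((orig ++ orig.reverse.take k).length : Int) - 1) - 2 * (k : Int)
          = ((orig.length - 1 - k : Nat) : Int) := by rw [hlen]; push_cast; omega
      have hlt : orig.length - 1 - k < orig.length := by omega
      have hget : PySem.List.pyGetD (orig ++ orig.reverse.take k)
          ((((orig ++ orig.reverse.take k).length : Int) - 1) - 2 * (k : Int)) ' '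
          = orig[orig.length - 1 - k] := by
        rw [hidx, PySem.List.pyGetD_natCast]
        rw [List.getD_eq_getElem?_getD,
          List.getElem?_append_left (by omega), List.getElem?_eq_getElem hlt]
        rfl
      rw [hget]
      have hstep : (orig ++ orig.reverse.take k) ++ [orig[orig.length - 1 - k]]
          = orig ++ orig.reverse.take (k + 1) := by
        rw [List.append_assoc]
        congr 1
        rw [List.take_add_one,
          List.getElem?_eq_getElem (by simp; omega)]
        congr 2
        rw [List.getElem_reverse]
      have h2 : 2 * (k : Int) + 2 = 2 * ((k + 1 : Nat) : Int) := by push_cast; ring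
      rw [hstep, h2, ih (orig.length - (k + 1)) (by omega) (k + 1) rfl (by omega)]
    · have hke : k = orig.length := by omega
      simp only [h, dif_neg, not_false_iff]
      subst hke
      rw [List.take_of_length_le (by simp)]

-- Loop invariant for the `l is False` loop: the loop appends orig.dropLast reversed.
theorem pvMirrorLoopF_eq (orig : List Char) : ∀ (k : Nat), k ≤ orig.length - 1 →
    pvMirrorLoopF ((orig.length : Int) + ((orig.length : Int) - 2)) (2 * (k : Int))
      (orig ++ orig.dropLast.reverse.take k) = orig ++ orig.dropLast.reverse := by
  intro k
  induction hd : orig.length - k using Nat.strong_induction_on generalizing k with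
  | _ d ih =>
    intro hk
    rw [pvMirrorLoopF]
    by_cases h : 2 * (k : Int) < ((orig.length : Int) + ((orig.length : Int) - 2))
    · have hklt : k + 1 < orig.length := by omega
      simp only [h, dif_pos]
      have hlen : (orig ++ orig.dropLast.reverse.take k).length = orig.length + k := by
        simp [List.length_dropLast]; omega
      have hidx : (((orig ++ orig.dropLast.reverse.take k).length : Int) - 2) - 2 * (k : Int)
          = ((orig.length - 2 - k : Nat) : Int) := by rw [hlen]; push_cast; omega
      have hlt : orig.length - 2 - k < orig.length := by omega
      have hget : PySem.List.pyGetD (orig ++ orig.dropLast.reverse.take k)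
          ((((orig ++ orig.dropLast.reverse.take k).length : Int) - 2) - 2 * (k : Int)) ' '
          = orig[orig.length - 2 - k] := by
        rw [hidx, PySem.List.pyGetD_natCast]
        rw [List.getD_eq_getElem?_getD,
          List.getElem?_append_left (by omega), List.getElem?_eq_getElem hlt]
        rfl
      rw [hget]
      have hstep : (orig ++ orig.dropLast.reverse.take k) ++ [orig[orig.length - 2 - k]]
          = orig ++ orig.dropLast.reverse.take (k + 1) := by
        rw [List.append_assoc]
        congr 1
        rw [List.take_add_one,
          List.getElem?_eq_getElem (by simp [List.length_dropLast]; omega)]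
        congr 2
        rw [List.getElem_reverse, List.getElem_dropLast]
        congr 1
        simp [List.length_dropLast]
        omega
      have h2 : 2 * (k : Int) + 2 = 2 * ((k + 1 : Nat) : Int) := by push_cast; ring
      rw [hstep, h2, ih (orig.length - (k + 1)) (by omega) (k + 1) rfl (by omega)]
    · have hke : k = orig.length - 1 := by omega
      simp only [h, dif_neg, not_false_iff]
      subst hke
      rw [List.take_of_length_le (by simp [List.length_dropLast])]

-- ===== VERDICT (by name: the statement is the Claim_ definition above) =====
theorem palindromify_spec : Claim_equal_palindromify := by
  intro p l _
  show palindromify p l = palindromify_alt p l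
  have hcopy : pvCopyLoop p.toList 0 [] = p.toList := by
    have := pvCopyLoop_eq p.toList 0 []
    simpa using this
  cases l with
  | true =>
    simp only [palindromify, palindromify_alt, hcopy, reduceIte,
      PySem.List.slice?_none_none_neg_one, Option.getD_some,
      PySem.List.foldl_append_singleton, List.nil_append]
    exact congrArg String.ofList (by simpa using pvMirrorLoopT_eq p.toList 0 (Nat.zero_le _))
  | false =>
    simp only [palindromify, palindromify_alt, hcopy, reduceIte,
      PySem.List.slice_to_neg_one, PySem.List.slice?_none_none_neg_one, Option.getD_some,
      PySem.List.foldl_append_singleton, List.nil_append]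
    exact congrArg String.ofList (by simpa using pvMirrorLoopF_eq p.toList 0 (Nat.zero_le _))
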